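-- pv_equiv track=rewrite | github.com/SalGuti0608/block_ciphers | main.py | to_RBG
-- ===== SOURCE A (Python) =====
-- def to_RBG(information): #some python & list/tuple comprehension magic
--     infoLen = len(information)
--     r,g,b = tuple(
--         map(
--             lambda d:
--             [information[i] for i in range(0, infoLen) if i % 3 == d], [0,1,2])
--         )
--     pixels = tuple(zip(r,g,b))
--     return pixels
-- ===== SOURCE B (Python) =====
-- def to_RBG(information):
--     n = len(information)
--     pixels = []
--     for i in range(0, (n // 3) * 3, 3):
--         pixels.append((information[i], information[i + 1], information[i + 2]))
--     return tuple(pixels)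
-- ===== Notes on version B (the rewrite author's own statement) =====
-- stated objective: simpler
-- what changed: One direct grouping pass over indices 0,3,6,... building each (R,G,B) triple in place, instead of building three channel lists by modulo filtering and recombining them with zip.
import Mathlib
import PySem

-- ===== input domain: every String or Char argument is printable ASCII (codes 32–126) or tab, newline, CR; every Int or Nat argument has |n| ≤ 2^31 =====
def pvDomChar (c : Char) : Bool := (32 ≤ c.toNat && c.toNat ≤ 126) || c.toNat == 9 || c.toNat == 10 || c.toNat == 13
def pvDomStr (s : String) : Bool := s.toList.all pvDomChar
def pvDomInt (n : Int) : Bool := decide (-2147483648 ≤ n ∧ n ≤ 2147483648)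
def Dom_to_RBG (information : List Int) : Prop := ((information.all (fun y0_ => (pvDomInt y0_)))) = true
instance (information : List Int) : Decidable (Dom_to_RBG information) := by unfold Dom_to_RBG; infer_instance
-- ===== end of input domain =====

-- B replaces A's three modulo-filtered channel lists recombined with zip by one direct
-- grouping pass over indices 0, 3, 6, …; objective: simpler.

-- ===== PORT A =====
-- one channel of A: [information[i] for i in range(0, infoLen) if i % 3 == d]
def pvChan (information : List Int) (d : Int) : List Int :=
  ((PySem.List.pyRange 0 (information.length : Int) 1).filter
      (fun i => PySem.Int.mod i 3 == d)).map
    (fun i => PySem.List.pyGetD information i 0)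

def to_RBG (information : List Int) : List (List Int) :=
  let chans := [(0 : Int), 1, 2].map (fun d => pvChan information d)
  match chans with
  | [r, g, b] => List.zipWith3 (fun x y z => [x, y, z]) r g b
  | _ => []   -- unreachable: chans always has exactly three elements

-- ===== PORT B =====
def to_RBG_alt (information : List Int) : List (List Int) :=
  (PySem.List.pyRange 0 ((PySem.Int.floordiv (information.length : Int) 3) * 3) 3).foldl
    (fun acc i =>
      acc ++ [[PySem.List.pyGetD information i 0,
               PySem.List.pyGetD information (i + 1) 0,
               PySem.List.pyGetD information (i + 2) 0]]) []

-- ===== PRECONDITION & SPEC =====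
def Spec_to_RBG (information : List Int) (out : List (List Int)) : Prop := out = to_RBG_alt information
instance (information : List Int) (out : List (List Int)) : Decidable (Spec_to_RBG information out) := by unfold Spec_to_RBG; infer_instance

-- ===== CLAIM (what is proved, stated in full; the proofs are below) =====
def Claim_equal_to_RBG : Prop := ∀ (information : List Int), Dom_to_RBG information → Spec_to_RBG information (to_RBG information)

-- ===== LEMMAS AND PROOFS =====

def pvNatChan (xs : List Int) (d : Nat) : List Int :=
  ((List.range xs.length).filter (fun k => k % 3 = d)).map (fun k => xs.getD k 0)

theorem getD_shift3 (a b c : Int) (t : List Int) (k : Nat) :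
    (a :: b :: c :: t).getD (3 + k) 0 = t.getD k 0 := by
  have : 3 + k = k + 1 + 1 + 1 := by omega
  rw [this]; rfl

theorem natChan_cons3 (a b c : Int) (t : List Int) (d : Nat) (hd : d < 3) :
    pvNatChan (a :: b :: c :: t) d = (List.getD [a, b, c] d 0) :: pvNatChan t d := by
  unfold pvNatChan
  have hl : (a :: b :: c :: t).length = 3 + t.length := by simp; omega
  rw [hl, List.range_add, List.filter_append, List.filter_map, List.map_append, List.map_map]
  have hmod : ∀ x ∈ List.range t.length,
      ((fun k => decide (k % 3 = d)) ∘ (fun x => 3 + x)) x = decide (x % 3 = d) := by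
    intro k _; simp [Function.comp, Nat.add_mod_left]
  rw [List.filter_congr hmod]
  have htail : (((List.range t.length).filter (fun k => decide (k % 3 = d))).map
        ((fun k => (a :: b :: c :: t).getD k 0) ∘ (fun x => 3 + x)))
      = ((List.range t.length).filter (fun k => k % 3 = d)).map (fun k => t.getD k 0) := by
    apply List.map_congr_left
    intro k _
    exact getD_shift3 a b c t k
  rw [htail]
  interval_cases d <;> simp [List.range_succ, List.getD]

def pvAltN (xs : List Int) : List (List Int) :=
  (List.range (xs.length / 3)).map
    (fun k => [xs.getD (3 * k) 0, xs.getD (3 * k + 1) 0, xs.getD (3 * k + 2) 0])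

def pvGrp : List Int → List (List Int)
  | a :: b :: c :: t => [a, b, c] :: pvGrp t
  | _ => []

theorem altN_cons3 (a b c : Int) (t : List Int) :
    pvAltN (a :: b :: c :: t) = [a, b, c] :: pvAltN t := by
  unfold pvAltN
  have hl : (a :: b :: c :: t).length / 3 = 1 + t.length / 3 := by simp; omega
  rw [hl, List.range_add, List.map_append, List.map_map]
  have h2 : (List.range (t.length / 3)).map
        ((fun k => [(a :: b :: c :: t).getD (3 * k) 0, (a :: b :: c :: t).getD (3 * k + 1) 0,
            (a :: b :: c :: t).getD (3 * k + 2) 0]) ∘ (fun x => 1 + x))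
      = (List.range (t.length / 3)).map
        (fun k => [t.getD (3 * k) 0, t.getD (3 * k + 1) 0, t.getD (3 * k + 2) 0]) := by
    apply List.map_congr_left
    intro k _
    simp only [Function.comp]
    have e0 : 3 * (1 + k) = 3 + 3 * k := by ring
    rw [e0]
    have e1 : 3 + 3 * k + 1 = 3 + (3 * k + 1) := by ring
    have e2 : 3 + 3 * k + 2 = 3 + (3 * k + 2) := by ring
    rw [e1, e2, getD_shift3, getD_shift3, getD_shift3]
  rw [h2]
  rfl

theorem altN_eq_grp (xs : List Int) : pvAltN xs = pvGrp xs := by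
  induction xs using pvGrp.induct with
  | case1 a b c t ih => rw [altN_cons3, ih, pvGrp]
  | case2 xs h =>
      match xs, h with
      | [], _ => simp [pvAltN, pvGrp]
      | [a], _ => simp [pvAltN, pvGrp]
      | [a, b], _ => simp [pvAltN, pvGrp]
      | a :: b :: c :: t, h => exact (h a b c t rfl).elim

theorem natChan_eq_grp (xs : List Int) :
    List.zipWith3 (fun x y z => [x, y, z]) (pvNatChan xs 0) (pvNatChan xs 1) (pvNatChan xs 2)
      = pvGrp xs := by
  induction xs using pvGrp.induct with
  | case1 a b c t ih =>
      rw [natChan_cons3 a b c t 0 (by omega), natChan_cons3 a b c t 1 (by omega),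
          natChan_cons3 a b c t 2 (by omega)]
      simp [pvGrp, List.zipWith3, List.getD, ih]
  | case2 xs h =>
      match xs, h with
      | [], _ => simp [pvNatChan, pvGrp, List.zipWith3]
      | [a], _ => simp [pvNatChan, pvGrp, List.zipWith3, List.range_succ]
      | [a, b], _ => simp [pvNatChan, pvGrp, List.zipWith3, List.range_succ]
      | a :: b :: c :: t, h => exact (h a b c t rfl).elim

theorem pvChan_eq_natChan (xs : List Int) (d : Int) (dn : Nat) (h : d = (dn : Int))
    (hd : dn < 3) : pvChan xs d = pvNatChan xs dn := by
  subst h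
  unfold pvChan pvNatChan
  rw [PySem.List.pyRange_one, List.filter_map, List.map_map]
  have hn : ((xs.length : Int) - 0).toNat = xs.length := by omega
  rw [hn]
  have hmod : ∀ k ∈ List.range xs.length,
      ((fun i => PySem.Int.mod i 3 == (dn : Int)) ∘ (fun k : Nat => (0 : Int) + k)) k
        = decide (k % 3 = dn) := by
    intro k _
    simp only [Function.comp, zero_add]
    have hm : PySem.Int.mod (k : Int) 3 = ((k % 3 : Nat) : Int) := by
      exact_mod_cast PySem.Int.mod_natCast k 3
    rw [hm]
    by_cases hkd : k % 3 = dn <;> simp [hkd] <;> omega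
  rw [List.filter_congr hmod]
  apply List.map_congr_left
  intro k _
  simp [Function.comp]

theorem pyRange_step3 (q : Nat) :
    PySem.List.pyRange 0 (3 * (q : Int)) 3
      = (List.range q).map (fun (k : Nat) => (3 : Int) * k) := by
  rw [PySem.List.pyRange_of_pos 0 (3 * (q : Int)) (by norm_num)]
  by_cases h : (0 : Int) < 3 * q
  · rw [if_pos h]
    have hq : ((3 * (q : Int) - 0 + 3 - 1) / 3).toNat = q := by omega
    rw [hq]
    apply List.map_congr_left
    intro k _
    omega
  · rw [if_neg h]
    have : q = 0 := by omega
    subst this; simp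

theorem to_RBG_alt_eq_altN (xs : List Int) : to_RBG_alt xs = pvAltN xs := by
  unfold to_RBG_alt pvAltN
  have hq : PySem.Int.floordiv (xs.length : Int) 3 * 3 = 3 * ((xs.length / 3 : Nat) : Int) := by
    have h := PySem.Int.floordiv_natCast xs.length 3
    have h3 : ((3 : Nat) : Int) = (3 : Int) := by norm_num
    rw [h3] at h
    rw [h]; ring
  rw [hq, pyRange_step3, PySem.List.foldl_append_singleton_eq_map, List.map_map,
      List.nil_append]
  apply List.map_congr_left
  intro k _
  simp only [Function.comp]
  have h0 : (3 : Int) * k = ((3 * k : Nat) : Int) := by push_cast; ring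
  rw [h0]
  have h1 : ((3 * k : Nat) : Int) + 1 = ((3 * k + 1 : Nat) : Int) := by push_cast; ring
  have h2 : ((3 * k : Nat) : Int) + 2 = ((3 * k + 2 : Nat) : Int) := by push_cast; ring
  rw [h1, h2, PySem.List.pyGetD_natCast, PySem.List.pyGetD_natCast,
      PySem.List.pyGetD_natCast]

-- ===== VERDICT (by name: the statement is the Claim_ definition above) =====
theorem to_RBG_spec : Claim_equal_to_RBG := by
  intro information _
  unfold Spec_to_RBG to_RBG
  simp only [List.map]
  rw [to_RBG_alt_eq_altN, altN_eq_grp,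
      pvChan_eq_natChan information 0 0 (by norm_num) (by omega),
      pvChan_eq_natChan information 1 1 (by norm_num) (by omega),
      pvChan_eq_natChan information 2 2 (by norm_num) (by omega)]
  exact natChan_eq_grp information
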